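-- pv_equiv track=rewrite | github.com/jimpago/Dataset-Queries | src/containment_queries.py | create_inverted_file
-- ===== SOURCE A (Python) =====
-- def create_inverted_file(transactions):
--     inverted = {}
--     for idx, transaction in enumerate(transactions):
--         for obj in transaction:
--             if obj not in inverted:
--                 inverted[obj] = []
--             inverted[obj].append(idx)
--     # Ταξινόμηση των λιστών για κάθε αντικείμενο
--     for obj in inverted:
--         inverted[obj].sort()
--     return inverted
-- ===== SOURCE B (Python) =====
-- def create_inverted_file(transactions):
--     occurrences = [(obj, idx) for idx, t in enumerate(transactions) for obj in t]
--     objects = dict.fromkeys(obj for obj, _ in occurrences)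
--     return {obj: [idx for o, idx in occurrences if o == obj] for obj in objects}
-- ===== Notes on version B (the rewrite author's own statement) =====
-- stated objective: alternative
-- what changed: A builds the index in one accumulating dict pass (appending the transaction index per occurrence, then sorting each list in place); B first flattens everything into a list of (object, index) occurrence pairs, then scans that list once per distinct object to collect its indices, needing no mutation and no final sort.
import Mathlib
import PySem

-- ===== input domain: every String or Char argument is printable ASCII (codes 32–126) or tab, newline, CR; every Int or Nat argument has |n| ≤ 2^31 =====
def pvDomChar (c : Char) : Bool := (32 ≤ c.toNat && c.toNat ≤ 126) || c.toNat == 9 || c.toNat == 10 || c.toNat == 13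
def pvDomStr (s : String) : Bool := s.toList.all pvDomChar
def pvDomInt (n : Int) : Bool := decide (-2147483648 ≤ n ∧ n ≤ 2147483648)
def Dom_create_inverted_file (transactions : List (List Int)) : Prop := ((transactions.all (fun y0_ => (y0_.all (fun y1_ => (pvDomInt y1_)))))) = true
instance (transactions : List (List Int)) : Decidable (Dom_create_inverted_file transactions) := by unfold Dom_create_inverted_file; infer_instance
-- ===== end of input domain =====

-- B replaces A's accumulating dict pass (append index per occurrence, then sort each list)
-- by flattening to (object, index) occurrence pairs and scanning that list once per distinct
-- object; a genuinely different traversal of the same cost, not claimed faster.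

-- ===== PORT A =====
def create_inverted_file (transactions : List (List Int)) : List (Int × List Int) :=
  let inverted : PySem.Dict Int (List Int) :=
    (PySem.List.enumerate transactions).foldl (fun d p =>
      p.2.foldl (fun d obj =>
        let d := if d.contains obj = false then d.insert obj [] else d
        d.insert obj (d.getD obj [] ++ [p.1])) d) PySem.Dict.empty
  let inverted := inverted.keys.foldl (fun d obj =>
      d.insert obj (PySem.List.sorted (d.getD obj []) (fun x => x) false)) inverted
  inverted.items

-- ===== PORT B =====
def create_inverted_file_alt (transactions : List (List Int)) : List (Int × List Int) :=
  let occurrences :=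
    (PySem.List.enumerate transactions).flatMap (fun p => p.2.map (fun obj => (obj, p.1)))
  let objects := PySem.List.dedup (occurrences.map (fun q => q.1))
  objects.map (fun obj => (obj, (occurrences.filter (fun q => q.1 == obj)).map (fun q => q.2)))

-- ===== PRECONDITION & SPEC =====
def Spec_create_inverted_file (transactions : List (List Int)) (out : List (Int × List Int)) : Prop := out = create_inverted_file_alt transactions
instance (transactions : List (List Int)) (out : List (Int × List Int)) : Decidable (Spec_create_inverted_file transactions out) := by unfold Spec_create_inverted_file; infer_instance

-- ===== CLAIM (what is proved, stated in full; the proofs are below) =====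
def Claim_equal_create_inverted_file : Prop := ∀ (transactions : List (List Int)), Dom_create_inverted_file transactions → Spec_create_inverted_file transactions (create_inverted_file transactions)

-- ===== LEMMAS AND PROOFS =====

-- A's inner-loop step, named for the proofs (definitionally the lambda in the port)
def pvStepA (idx : Int) (d : PySem.Dict Int (List Int)) (obj : Int) : PySem.Dict Int (List Int) :=
  let d := if d.contains obj = false then d.insert obj [] else d
  d.insert obj (d.getD obj [] ++ [idx])

theorem pvStepA_getD (idx : Int) (d : PySem.Dict Int (List Int)) (obj o : Int) :
    (pvStepA idx d obj).getD o [] = if o = obj then d.getD o [] ++ [idx] else d.getD o [] := by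
  unfold pvStepA
  cases hc : d.contains obj with
  | false =>
    simp only [if_true, PySem.Dict.getD_insert]
    by_cases ho : o = obj
    · subst ho; simp [PySem.Dict.getD_of_not_contains d [] hc]
    · simp [ho]
  | true =>
    simp only [Bool.true_eq_false, if_false, PySem.Dict.getD_insert]
    split_ifs with ho
    · rw [ho]
    · rfl

theorem pvStepA_keys (idx : Int) (d : PySem.Dict Int (List Int)) (obj : Int) :
    (pvStepA idx d obj).keys = PySem.Set.add d.keys obj := by
  unfold pvStepA
  cases hc : d.contains obj with
  | false =>
    have hm : obj ∉ d.keys := fun hm => by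
      simp [(PySem.Dict.contains_iff_mem_keys d obj).2 hm] at hc
    simp only [if_true]
    rw [PySem.Dict.keys_insert_of_contains _ _ (PySem.Dict.contains_insert_self d obj []),
        PySem.Dict.keys_insert_of_not_contains d [] hc]
    simp [PySem.Set.add, PySem.Set.contains, hm]
  | true =>
    have hm : obj ∈ d.keys := (PySem.Dict.contains_iff_mem_keys d obj).1 hc
    simp only [Bool.true_eq_false, if_false]
    rw [PySem.Dict.keys_insert_of_contains _ _ hc]
    simp [PySem.Set.add, PySem.Set.contains, hm]

theorem pvInner_getD (idx : Int) (t : List Int) (d : PySem.Dict Int (List Int)) (o : Int) :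
    (t.foldl (pvStepA idx) d).getD o [] = d.getD o [] ++ List.replicate (t.count o) idx := by
  induction t generalizing d with
  | nil => simp
  | cons x t ih =>
    simp only [List.foldl_cons, ih, pvStepA_getD]
    by_cases ho : o = x
    · subst ho
      simp [List.replicate_succ, List.append_assoc]
    · simp [Ne.symm ho, ho]

theorem pvInner_keys (idx : Int) (t : List Int) (d : PySem.Dict Int (List Int)) :
    (t.foldl (pvStepA idx) d).keys = PySem.Set.update d.keys t := by
  induction t generalizing d with
  | nil => rfl
  | cons x t ih =>
    simp only [List.foldl_cons, ih, pvStepA_keys]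
    rfl

-- B's occurrence-pair list and per-object index list
def pvOcc (transactions : List (List Int)) : List (Int × Int) :=
  (PySem.List.enumerate transactions).flatMap (fun p => p.2.map (fun obj => (obj, p.1)))

def pvVal (transactions : List (List Int)) (o : Int) : List Int :=
  ((pvOcc transactions).filter (fun q => q.1 == o)).map (fun q => q.2)

-- per-transaction: filtering the pair list of one transaction yields the index replicated per occurrence
theorem pvPairs_filter (i : Int) (t : List Int) (o : Int) :
    ((t.map (fun obj => (obj, i))).filter (fun q => q.1 == o)).map (fun q => q.2)
      = List.replicate (t.count o) i := by
  induction t with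
  | nil => simp
  | cons x t ih =>
    by_cases hx : x = o
    · subst hx
      simp [ih, List.replicate_succ]
    · simp [hx, ih]

theorem pvVal_eq_replicate (l : List (Int × List Int)) (o : Int) :
    ((l.flatMap (fun p => p.2.map (fun obj => (obj, p.1)))).filter (fun q => q.1 == o)).map (fun q => q.2)
      = l.flatMap (fun p => List.replicate (p.2.count o) p.1) := by
  induction l with
  | nil => rfl
  | cons p l ih =>
    simp only [List.flatMap_cons, List.filter_append, List.map_append, ih, pvPairs_filter]

theorem pvOcc_map_fst (l : List (Int × List Int)) :
    (l.flatMap (fun p => p.2.map (fun obj => (obj, p.1)))).map (fun q => q.1)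
      = l.flatMap (fun p => p.2) := by
  induction l with
  | nil => rfl
  | cons p l ih =>
    simp only [List.flatMap_cons, List.map_append, List.map_map, ih]
    congr 1
    simp [Function.comp_def]

theorem pvEnum_snd (ts : List (List Int)) (s : Int) :
    (PySem.List.enumerate ts s).flatMap (fun p => p.2) = ts.flatten := by
  induction ts generalizing s with
  | nil => simp [PySem.List.enumerate_nil]
  | cons t ts ih =>
    rw [PySem.List.enumerate_cons]
    simp [ih]

theorem pvOuter_getD (ts : List (List Int)) (s : Int) (d : PySem.Dict Int (List Int)) (o : Int) :
    ((PySem.List.enumerate ts s).foldl (fun d p => p.2.foldl (pvStepA p.1) d) d).getD o []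
      = d.getD o [] ++ (PySem.List.enumerate ts s).flatMap (fun p => List.replicate (p.2.count o) p.1) := by
  induction ts generalizing s d with
  | nil => simp [PySem.List.enumerate_nil]
  | cons t ts ih =>
    rw [PySem.List.enumerate_cons]
    simp only [List.foldl_cons, List.flatMap_cons, ih, pvInner_getD, List.append_assoc]

theorem pvOuter_keys (ts : List (List Int)) (s : Int) (d : PySem.Dict Int (List Int)) :
    ((PySem.List.enumerate ts s).foldl (fun d p => p.2.foldl (pvStepA p.1) d) d).keys
      = PySem.Set.update d.keys ts.flatten := by
  induction ts generalizing s d with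
  | nil => simp [PySem.List.enumerate_nil]
  | cons t ts ih =>
    rw [PySem.List.enumerate_cons]
    simp only [List.foldl_cons, List.flatten_cons, ih, pvInner_keys]
    simp [PySem.Set.update, List.foldl_append]

theorem pvSort_getD (l : List Int) (d : PySem.Dict Int (List Int)) (j : Int) :
    (l.foldl (fun d k => d.insert k (PySem.List.sorted (d.getD k []) (fun x => x) false)) d).getD j []
      = if j ∈ l then PySem.List.sorted (d.getD j []) (fun x => x) false else d.getD j [] := by
  induction l generalizing d with
  | nil => simp
  | cons k l ih =>
    simp only [List.foldl_cons, ih, PySem.Dict.getD_insert, List.mem_cons]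
    by_cases hj : j = k
    · subst hj
      by_cases hl : j ∈ l <;> simp [hl, PySem.List.sorted_sorted]
    · by_cases hl : j ∈ l <;> simp [hj, hl]

theorem pvUpdate_self (s l : List Int) (h : ∀ x ∈ l, x ∈ s) :
    PySem.Set.update s l = s := by
  induction l generalizing s with
  | nil => rfl
  | cons x l ih =>
    have hx : x ∈ s := h x (List.mem_cons_self)
    show PySem.Set.update (PySem.Set.add s x) l = s
    rw [show PySem.Set.add s x = s by simp [PySem.Set.add, PySem.Set.contains, hx]]
    exact ih s (fun y hy => h y (List.mem_cons_of_mem _ hy))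

theorem pvVal_pairwise (ts : List (List Int)) (s : Int) (o : Int) :
    ((PySem.List.enumerate ts s).flatMap (fun p => List.replicate (p.2.count o) p.1)).Pairwise (· ≤ ·) := by
  induction ts generalizing s with
  | nil => simp [PySem.List.enumerate_nil]
  | cons t ts ih =>
    rw [PySem.List.enumerate_cons]
    simp only [List.flatMap_cons]
    refine List.pairwise_append.2 ⟨List.pairwise_replicate.2 (Or.inr le_rfl), ih (s + 1), ?_⟩
    intro a ha b hb
    have ha' : a = s := (List.eq_of_mem_replicate ha)
    rcases List.mem_flatMap.1 hb with ⟨p, hp, hbp⟩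
    rcases (PySem.List.mem_enumerate_iff ts (s + 1) p).1 hp with ⟨k, hk, rfl⟩
    have hb' : b = s + 1 + (k : Int) := List.eq_of_mem_replicate hbp
    subst ha'; rw [hb']; omega

theorem pv_main (ts : List (List Int)) :
    create_inverted_file ts = create_inverted_file_alt ts := by
  have h0 : create_inverted_file ts =
      (let d1 := (PySem.List.enumerate ts).foldl (fun d p => p.2.foldl (pvStepA p.1) d) PySem.Dict.empty
       (d1.keys.foldl (fun d obj =>
          d.insert obj (PySem.List.sorted (d.getD obj []) (fun x => x) false)) d1).items) := rfl
  rw [h0]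
  set d1 := (PySem.List.enumerate ts).foldl (fun d p => p.2.foldl (pvStepA p.1) d) PySem.Dict.empty with hd1
  set d2 := d1.keys.foldl (fun d obj =>
      d.insert obj (PySem.List.sorted (d.getD obj []) (fun x => x) false)) d1 with hd2
  have hk1 : d1.keys = PySem.Set.ofList ts.flatten := by
    rw [hd1, pvOuter_keys ts 0 PySem.Dict.empty]
    simp [PySem.Set.update_nil_left]
  have hnd1 : d1.keys.Nodup := by rw [hk1]; exact PySem.Set.nodup_ofList _
  have hg1 : ∀ o, d1.getD o [] = (PySem.List.enumerate ts).flatMap (fun p => List.replicate (p.2.count o) p.1) := by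
    intro o
    rw [hd1, pvOuter_getD ts 0 PySem.Dict.empty o]
    simp
  have hk2 : d2.keys = d1.keys := by
    rw [hd2, PySem.Dict.keys_foldl_insert, pvUpdate_self _ _ (fun x hx => hx)]
  have hg2 : ∀ j, d2.getD j [] = if j ∈ d1.keys then PySem.List.sorted (d1.getD j []) (fun x => x) false else d1.getD j [] := by
    intro j; rw [hd2, pvSort_getD]
  have hitems : d2.items = d2.keys.map (fun k => (k, d2.getD k [])) :=
    PySem.Dict.items_eq_map_keys d2 (hk2 ▸ hnd1) []
  show d2.items = create_inverted_file_alt ts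
  rw [hitems, hk2]
  unfold create_inverted_file_alt
  simp only
  have hobjs : PySem.List.dedup ((pvOcc ts).map (fun q => q.1)) = d1.keys := by
    rw [hk1, PySem.List.dedup_eq_ofList]
    congr 1
    rw [pvOcc, pvOcc_map_fst, pvEnum_snd]
  rw [show ((PySem.List.enumerate ts).flatMap (fun p => p.2.map (fun obj => (obj, p.1)))) = pvOcc ts from rfl,
      hobjs]
  apply List.map_congr_left
  intro k hk
  rw [hg2 k, if_pos hk, hg1 k,
      PySem.List.sorted_eq_self_of_pairwise _ _ (pvVal_pairwise ts 0 k),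
      show ((pvOcc ts).filter (fun q => q.1 == k)).map (fun q => q.2)
        = (PySem.List.enumerate ts).flatMap (fun p => List.replicate (p.2.count k) p.1) from pvVal_eq_replicate _ k]

-- ===== VERDICT (by name: the statement is the Claim_ definition above) =====
theorem create_inverted_file_spec : Claim_equal_create_inverted_file := by
  intro ts _
  unfold Spec_create_inverted_file
  exact pv_main ts
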